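-- pv_equiv track=rewrite | github.com/jkasimotto/PPI-Network-Analysis | lib/cluster.py | non_overlapping
-- ===== SOURCE A (Python) =====
-- import itertools
--
-- def non_overlapping(old_clusters):
--     """Very inefficient. TODO: Write 1-3 tests."""
--     # Keep a list of all nodes and the index of their largest cluster
--     old_clusters = sorted(old_clusters, key=len, reverse=True)  # Largest to smallest
--     new_clusters = []
--     nodes = {k: None for k in itertools.chain.from_iterable(old_clusters)}
--     for i, cluster in enumerate(old_clusters):
--         for node in cluster:
--             if nodes[node] is None:
--                 nodes[node] = i
--     for i in range(len(old_clusters)):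
--         new_clusters.append([])
--         for node, index in nodes.items():
--             if index == i:
--                 new_clusters[-1].append(node)
--     return new_clusters
-- ===== SOURCE B (Python) =====
-- def non_overlapping(old_clusters):
--     """Single greedy pass: each node stays in the first (largest) cluster that contains it."""
--     old_clusters = sorted(old_clusters, key=len, reverse=True)  # Largest to smallest
--     new_clusters = []
--     seen = set()
--     for cluster in old_clusters:
--         kept = []
--         for node in cluster:
--             if node not in seen:
--                 seen.add(node)
--                 kept.append(node)
--         new_clusters.append(kept)
--     return new_clusters
-- ===== Notes on version B (the rewrite author's own statement) =====
-- stated objective: faster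
-- what changed: Replaces A's three-phase scheme (node->first-cluster-index dict built over all nodes, then a rescan of the whole dict for every cluster index to regroup) with a single greedy pass that keeps a 'seen' set and emits each cluster's unseen nodes directly.
import Mathlib
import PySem

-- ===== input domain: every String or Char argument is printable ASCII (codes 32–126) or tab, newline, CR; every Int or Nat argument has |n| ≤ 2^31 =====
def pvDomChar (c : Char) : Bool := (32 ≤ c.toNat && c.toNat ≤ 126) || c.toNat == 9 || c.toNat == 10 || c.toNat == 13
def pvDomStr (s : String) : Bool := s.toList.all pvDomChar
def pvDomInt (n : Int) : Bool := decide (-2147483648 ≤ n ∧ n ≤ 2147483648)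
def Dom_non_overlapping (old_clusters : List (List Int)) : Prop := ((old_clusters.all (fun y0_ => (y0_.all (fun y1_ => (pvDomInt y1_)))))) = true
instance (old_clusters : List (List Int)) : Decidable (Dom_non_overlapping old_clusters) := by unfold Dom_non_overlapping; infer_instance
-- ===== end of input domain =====

-- B replaces A's dict-of-first-indices plus per-cluster-index rescan by one greedy pass with a seen-set (measured faster; same results).

-- ===== PORT A =====
def non_overlapping (old_clusters : List (List Int)) : List (List Int) :=
  -- old_clusters = sorted(old_clusters, key=len, reverse=True)
  let old := PySem.List.sorted old_clusters (fun c => c.length) true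
  -- nodes = {k: None for k in itertools.chain.from_iterable(old_clusters)}
  let nodes : PySem.Dict Int (Option Int) :=
    old.flatten.foldl (fun d k => d.insert k none) PySem.Dict.empty
  -- for i, cluster in enumerate(old_clusters): for node in cluster: if nodes[node] is None: nodes[node] = i
  let nodes :=
    (PySem.List.enumerate old).foldl
      (fun d p => p.2.foldl (fun d node =>
          if d.getD node none = none then d.insert node (some p.1) else d) d)
      nodes
  -- for i in range(len(old_clusters)): new_clusters.append([]); for node, index in nodes.items(): if index == i: new_clusters[-1].append(node)
  (PySem.List.pyRange 0 (old.length : Int)).foldl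
    (fun acc i =>
      acc ++ [nodes.items.foldl (fun l p => if p.2 = some i then l ++ [p.1] else l) []])
    []

-- ===== PORT B =====
def non_overlapping_alt (old_clusters : List (List Int)) : List (List Int) :=
  let old := PySem.List.sorted old_clusters (fun c => c.length) true
  (old.foldl
    (fun (st : List (List Int) × PySem.Set Int) cluster =>
      let r := cluster.foldl
        (fun (p : List Int × PySem.Set Int) node =>
          if PySem.Set.contains p.2 node then p else (p.1 ++ [node], PySem.Set.add p.2 node))
        ([], st.2)
      (st.1 ++ [r.1], r.2))
    ([], PySem.Set.empty)).1

-- ===== PRECONDITION & SPEC =====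
def Spec_non_overlapping (old_clusters : List (List Int)) (out : List (List Int)) : Prop := out = non_overlapping_alt old_clusters
instance (old_clusters : List (List Int)) (out : List (List Int)) : Decidable (Spec_non_overlapping old_clusters out) := by unfold Spec_non_overlapping; infer_instance

-- ===== CLAIM (what is proved, stated in full; the proofs are below) =====
def Claim_equal_non_overlapping : Prop := ∀ (old_clusters : List (List Int)), Dom_non_overlapping old_clusters → Spec_non_overlapping old_clusters (non_overlapping old_clusters)

-- ===== LEMMAS AND PROOFS =====

-- B's inner loop, structurally: the nodes of l not yet in seen, first occurrences, in order
def keptL (seen : PySem.Set Int) : List Int → List Int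
  | [] => []
  | n :: l => if PySem.Set.contains seen n then keptL seen l else n :: keptL (PySem.Set.add seen n) l

-- B's outer loop, structurally
def blocksL (seen : PySem.Set Int) : List (List Int) → List (List Int)
  | [] => []
  | c :: cs => keptL seen c :: blocksL (PySem.Set.update seen c) cs

-- index (starting at j) of the first cluster containing n
def firstTag (j : Int) : List (List Int) → Int → Option Int
  | [], _ => none
  | c :: cs, n => if n ∈ c then some j else firstTag (j + 1) cs n

theorem keptL_foldl (c : List Int) : ∀ (seen : PySem.Set Int) (acc : List Int),
    c.foldl (fun (p : List Int × PySem.Set Int) node =>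
        if PySem.Set.contains p.2 node then p else (p.1 ++ [node], PySem.Set.add p.2 node))
      (acc, seen)
    = (acc ++ keptL seen c, PySem.Set.update seen c) := by
  induction c with
  | nil => intro seen acc; simp [keptL, PySem.Set.update]
  | cons n c ih =>
    intro seen acc
    rw [List.foldl_cons]
    by_cases h : PySem.Set.contains seen n
    · show List.foldl _ (if PySem.Set.contains seen n = true then _ else _) c = _
      rw [if_pos h, ih, keptL, if_pos h]
      have hm : n ∈ seen := by simpa [PySem.Set.contains] using h
      have : PySem.Set.update seen (n :: c) = PySem.Set.update seen c := by
        simp [PySem.Set.update, PySem.Set.add, hm]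
      rw [this]
    · show List.foldl _ (if PySem.Set.contains seen n = true then _ else _) c = _
      rw [if_neg h, ih, keptL, if_neg h]
      have : PySem.Set.update seen (n :: c) = PySem.Set.update (PySem.Set.add seen n) c := by
        simp [PySem.Set.update]
      rw [this]
      simp

theorem mem_keptL {n : Int} (l : List Int) : ∀ (seen : PySem.Set Int),
    n ∈ keptL seen l → n ∈ l ∧ n ∉ seen := by
  induction l with
  | nil => intro seen h; simp [keptL] at h
  | cons m l ih =>
    intro seen h
    by_cases hc : m ∈ seen
    · simp only [keptL, if_pos (by simpa [PySem.Set.contains] using hc : PySem.Set.contains seen m = true)] at h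
      obtain ⟨h1, h2⟩ := ih seen h
      exact ⟨List.mem_cons_of_mem _ h1, h2⟩
    · simp only [keptL, if_neg (by simpa [PySem.Set.contains] using hc : ¬ PySem.Set.contains seen m = true)] at h
      rw [List.mem_cons] at h
      rcases h with rfl | h
      · exact ⟨List.mem_cons_self, hc⟩
      · obtain ⟨h1, h2⟩ := ih (PySem.Set.add seen m) h
        refine ⟨List.mem_cons_of_mem _ h1, fun hmem => h2 ?_⟩
        simpa [PySem.Set.mem_add] using Or.inl hmem

theorem update_eq_append (l : List Int) : ∀ (seen : PySem.Set Int),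
    PySem.Set.update seen l = seen ++ keptL seen l := by
  induction l with
  | nil => intro seen; simp [keptL, PySem.Set.update]
  | cons n l ih =>
    intro seen
    by_cases h : n ∈ seen
    · simp [PySem.Set.update, PySem.Set.add, h, keptL]
      simpa [PySem.Set.update] using ih seen
    · simp only [PySem.Set.update, List.foldl_cons] at ih ⊢
      rw [show PySem.Set.add seen n = seen ++ [n] by simp [PySem.Set.add, h]]
      rw [ih]
      simp [keptL, h, PySem.Set.add]

theorem blocksL_foldl (cs : List (List Int)) : ∀ (seen : PySem.Set Int) (acc : List (List Int)),
    cs.foldl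
      (fun (st : List (List Int) × PySem.Set Int) cluster =>
        let r := cluster.foldl
          (fun (p : List Int × PySem.Set Int) node =>
            if PySem.Set.contains p.2 node then p else (p.1 ++ [node], PySem.Set.add p.2 node))
          ([], st.2)
        (st.1 ++ [r.1], r.2))
      (acc, seen)
    = (acc ++ blocksL seen cs, PySem.Set.update seen cs.flatten) := by
  induction cs with
  | nil => intro seen acc; simp [blocksL, PySem.Set.update]
  | cons c cs ih =>
    intro seen acc
    rw [List.foldl_cons]
    show List.foldl _ (acc ++ [(List.foldl _ ([], seen) c).1], (List.foldl _ ([], seen) c).2) cs = _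
    rw [keptL_foldl]
    rw [ih]
    simp [blocksL]
    simp [PySem.Set.update, List.foldl_append]

theorem keptL_append (a b : List Int) : ∀ (seen : PySem.Set Int),
    keptL seen (a ++ b) = keptL seen a ++ keptL (PySem.Set.update seen a) b := by
  induction a with
  | nil => intro seen; simp [keptL, PySem.Set.update]
  | cons n a ih =>
    intro seen
    by_cases h : PySem.Set.contains seen n
    · have hm : n ∈ seen := by simpa [PySem.Set.contains] using h
      rw [List.cons_append, keptL, if_pos h, keptL, if_pos h, ih]
      have : PySem.Set.update seen (n :: a) = PySem.Set.update seen a := by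
        simp [PySem.Set.update, PySem.Set.add, hm]
      rw [this]
    · rw [List.cons_append, keptL, if_neg h, keptL, if_neg h, ih]
      have : PySem.Set.update seen (n :: a) = PySem.Set.update (PySem.Set.add seen n) a := by
        simp [PySem.Set.update]
      rw [this, List.cons_append]

theorem firstTag_ge {j i : Int} (cs : List (List Int)) {n : Int} :
    firstTag j cs n = some i → j ≤ i := by
  induction cs generalizing j with
  | nil => intro h; simp [firstTag] at h
  | cons c cs ih =>
    intro h
    by_cases hm : n ∈ c
    · simp [firstTag, hm] at h; omega
    · simp [firstTag, hm] at h
      have := ih h; omega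

theorem items_phase1 (l : List Int) : ∀ (d : PySem.Dict Int (Option Int)),
    (∀ p ∈ d.items, p.2 = none) →
    (l.foldl (fun d k => d.insert k none) d).items
      = (PySem.Set.update (d.items.map Prod.fst) l).map (fun n => (n, (none : Option Int))) := by
  induction l with
  | nil =>
    intro d h
    have : List.map (fun n => (n, (none : Option Int))) (d.items.map Prod.fst)
        = List.map id d.items := by
      rw [List.map_map]
      apply List.map_congr_left
      intro p hp
      cases p with | mk a b =>
        simp only [Function.comp_apply, id_eq, Prod.mk.injEq, true_and]
        exact (h _ hp).symm
    simp [PySem.Set.update, this]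
  | cons k l ih =>
    intro d h
    rw [List.foldl_cons]
    rw [ih (d.insert k none) (by
      intro p hp
      rcases (PySem.Dict.mem_items_insert d k none p).1 hp with h1 | h1
      · simp [h1]
      · exact h p h1.1)]
    by_cases hc : d.contains k
    · have hitems : (d.insert k none).items = d.items := by
        rw [PySem.Dict.items_insert_of_contains d none hc]
        have : List.map (fun p => if (p.1 == k) = true then (k, (none : Option Int)) else p) d.items
            = List.map id d.items := by
          apply List.map_congr_left
          intro p hp
          by_cases hk : p.1 == k
          · have h1 : p.1 = k := by simpa using hk
            have h2 : p.2 = none := h _ hp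
            cases p with | mk a b => simp_all
          · simp [hk]
        rw [this, List.map_id]
      rw [hitems]
      have hk : k ∈ d.items.map Prod.fst := by
        have := (PySem.Dict.contains_iff_mem_keys d k).1 hc
        simpa [PySem.Dict.keys] using this
      have : PySem.Set.update (d.items.map Prod.fst) (k :: l)
          = PySem.Set.update (d.items.map Prod.fst) l := by
        simp [PySem.Set.update, PySem.Set.add, hk]
      rw [this]
    · rw [PySem.Dict.items_insert_of_not_contains d none (by simpa using hc)]
      have hk : k ∉ d.items.map Prod.fst := by
        intro hmem
        have := (PySem.Dict.contains_iff_mem_keys d k).2 (by simpa [PySem.Dict.keys] using hmem)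
        simp [this] at hc
      have : PySem.Set.update (d.items.map Prod.fst) (k :: l)
          = PySem.Set.update (d.items.map Prod.fst ++ [k]) l := by
        simp [PySem.Set.update, PySem.Set.add, hk]
      rw [this]
      simp

theorem items_inner (c : List Int) (i : Int) : ∀ (d : PySem.Dict Int (Option Int)),
    d.keys.Nodup → (∀ n ∈ c, d.contains n = true) →
    (c.foldl (fun d node => if d.getD node none = none then d.insert node (some i) else d) d).items
      = d.items.map (fun p => (p.1, if p.2 = none ∧ p.1 ∈ c then some i else p.2)) := by
  induction c with
  | nil =>
    intro d hnd h
    rw [List.foldl_nil]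
    symm
    conv_rhs => rw [← List.map_id d.items]
    apply List.map_congr_left
    intro p hp
    simp
  | cons n c ih =>
    intro d hnd h
    have hcn : d.contains n = true := h n (by simp)
    rw [List.foldl_cons]
    by_cases hg : d.getD n none = none
    · rw [if_pos hg]
      -- n is present with value none
      have hitems1 : (d.insert n (some i)).items
          = d.items.map (fun p => if (p.1 == n) = true then (n, some i) else p) :=
        PySem.Dict.items_insert_of_contains d (some i) hcn
      have hkeys1 : (d.insert n (some i)).keys = d.keys := by
        simp only [PySem.Dict.keys, hitems1, List.map_map]
        apply List.map_congr_left
        intro p hp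
        by_cases hk : p.1 = n
        · simp [hk]
        · simp [hk]
      have hnd1 : (d.insert n (some i)).keys.Nodup := by rw [hkeys1]; exact hnd
      have hcont1 : ∀ m ∈ c, (d.insert n (some i)).contains m = true := by
        intro m hm
        rw [PySem.Dict.contains_iff_mem_keys, hkeys1, ← PySem.Dict.contains_iff_mem_keys]
        exact h m (by simp [hm])
      rw [ih _ hnd1 hcont1, hitems1, List.map_map]
      apply List.map_congr_left
      intro p hp
      by_cases hk : p.1 = n
      · have hgd : d.getD p.1 none = p.2 := PySem.Dict.getD_of_mem_items d (by cases p; exact hp) hnd none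
        have hv : p.2 = none := by rw [← hgd, hk]; exact hg
        simp [Function.comp, hk, hv]
      · simp [Function.comp, hk]
    · rw [if_neg hg]
      rw [ih _ hnd (fun m hm => h m (by simp [hm]))]
      apply List.map_congr_left
      intro p hp
      by_cases hk : p.1 = n
      · have hv : d.getD p.1 none = p.2 := PySem.Dict.getD_of_mem_items d (by cases p; exact hp) hnd none
        have : p.2 ≠ none := by rw [← hv, hk]; exact hg
        simp [this]
      · simp [hk]

theorem items_phase2 (cs : List (List Int)) : ∀ (j : Int) (d : PySem.Dict Int (Option Int)),
    d.keys.Nodup → (∀ n ∈ cs.flatten, d.contains n = true) →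
    ((PySem.List.enumerate cs j).foldl
        (fun d p => p.2.foldl (fun d node =>
            if d.getD node none = none then d.insert node (some p.1) else d) d) d).items
      = d.items.map (fun p => (p.1, if p.2 = none then firstTag j cs p.1 else p.2)) := by
  induction cs with
  | nil =>
    intro j d hnd h
    simp [PySem.List.enumerate, firstTag]
    symm
    conv_rhs => rw [← List.map_id d.items]
    apply List.map_congr_left
    intro p hp
    rcases p with ⟨a, b⟩
    cases b <;> simp
  | cons c cs ih =>
    intro j d hnd h
    rw [PySem.List.enumerate_cons, List.foldl_cons]
    have hflat : ∀ n ∈ c, d.contains n = true := fun n hn => h n (by simp [hn])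
    have hin := items_inner c j d hnd hflat
    set d1 := c.foldl (fun d node => if d.getD node none = none then d.insert node (some j) else d) d with hd1
    have hkeys1 : d1.keys = d.keys := by
      simp only [PySem.Dict.keys, hin, List.map_map]
      apply List.map_congr_left
      intro p hp
      simp
    have hnd1 : d1.keys.Nodup := by rw [hkeys1]; exact hnd
    have hcont1 : ∀ n ∈ cs.flatten, d1.contains n = true := by
      intro m hm
      rw [PySem.Dict.contains_iff_mem_keys, hkeys1, ← PySem.Dict.contains_iff_mem_keys]
      exact h m (by simp [hm])
    rw [ih (j + 1) d1 hnd1 hcont1, hin, List.map_map]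
    apply List.map_congr_left
    intro p hp
    by_cases h2 : p.2 = none
    · by_cases hm : p.1 ∈ c
      · simp [Function.comp, firstTag, h2, hm]
      · simp [Function.comp, firstTag, h2, hm]
    · simp [Function.comp, h2]

theorem filter_blocks (cs : List (List Int)) : ∀ (seen : PySem.Set Int) (j : Int),
    (PySem.List.pyRange j (j + (cs.length : Int))).map
      (fun i => (keptL seen cs.flatten).filter (fun n => firstTag j cs n == some i))
    = blocksL seen cs := by
  induction cs with
  | nil => intro seen j; simp [blocksL, PySem.List.pyRange]
  | cons c cs ih =>
    intro seen j
    have hcons : PySem.List.pyRange j (j + ((c :: cs).length : Int))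
        = j :: PySem.List.pyRange (j + 1) (j + 1 + (cs.length : Int)) := by
      rw [PySem.List.pyRange_one_cons (by simp only [List.length_cons]; push_cast; omega)]
      congr 2
      simp only [List.length_cons]
      push_cast
      ring
    rw [hcons, List.map_cons]
    have hflat : (c :: cs).flatten = c ++ cs.flatten := rfl
    rw [hflat, keptL_append]
    rw [show blocksL seen (c :: cs) = keptL seen c :: blocksL (PySem.Set.update seen c) cs from rfl]
    congr 1
    · -- head block
      rw [List.filter_append]
      have h1 : (keptL seen c).filter (fun n => firstTag j (c :: cs) n == some j) = keptL seen c := by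
        apply List.filter_eq_self.2
        intro n hn
        have := (mem_keptL c seen hn).1
        simp [firstTag, this]
      have h2 : (keptL (PySem.Set.update seen c) cs.flatten).filter
            (fun n => firstTag j (c :: cs) n == some j) = [] := by
        apply List.filter_eq_nil_iff.2
        intro n hn
        obtain ⟨-, hns⟩ := mem_keptL cs.flatten _ hn
        have hnc : n ∉ c := fun hc => hns ((PySem.Set.mem_update seen c n).2 (Or.inr hc))
        simp only [firstTag, if_neg hnc]
        intro hbe
        have heq : firstTag (j + 1) cs n = some j := by simpa using hbe
        have := firstTag_ge cs heq
        omega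
      rw [h1, h2, List.append_nil]
    · -- tail blocks
      rw [← ih (PySem.Set.update seen c) (j + 1)]
      apply List.map_congr_left
      intro i hi
      have hji : j + 1 ≤ i := ((PySem.List.mem_pyRange_one).1 hi).1
      rw [List.filter_append]
      have h1 : (keptL seen c).filter (fun n => firstTag j (c :: cs) n == some i) = [] := by
        apply List.filter_eq_nil_iff.2
        intro n hn
        have := (mem_keptL c seen hn).1
        simp [firstTag, this]
        omega
      have h2 : (keptL (PySem.Set.update seen c) cs.flatten).filter
            (fun n => firstTag j (c :: cs) n == some i)
          = (keptL (PySem.Set.update seen c) cs.flatten).filter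
            (fun n => firstTag (j + 1) cs n == some i) := by
        apply List.filter_congr
        intro n hn
        obtain ⟨-, hns⟩ := mem_keptL cs.flatten _ hn
        have hnc : n ∉ c := fun hc => hns ((PySem.Set.mem_update seen c n).2 (Or.inr hc))
        simp [firstTag, hnc]
      rw [h1, h2, List.nil_append]

-- ===== VERDICT (by name: the statement is the Claim_ definition above) =====
theorem non_overlapping_spec : Claim_equal_non_overlapping := by
  intro old_clusters _
  unfold Spec_non_overlapping non_overlapping non_overlapping_alt
  generalize (PySem.List.sorted old_clusters (fun c => c.length) true) = cs
  dsimp only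
  -- B side
  rw [blocksL_foldl cs PySem.Set.empty []]
  simp only [List.nil_append]
  -- A side, phase 1
  have h1 := items_phase1 cs.flatten PySem.Dict.empty (by intro p hp; simp [PySem.Dict.empty] at hp)
  have hupd : PySem.Set.update ((PySem.Dict.items (PySem.Dict.empty (κ := Int) (ν := Option Int))).map Prod.fst) cs.flatten
      = keptL PySem.Set.empty cs.flatten := by
    have := update_eq_append cs.flatten PySem.Set.empty
    simpa [PySem.Dict.empty, PySem.Dict.items, PySem.Set.empty] using this
  rw [hupd] at h1
  set d1 := cs.flatten.foldl (fun d k => d.insert k none) PySem.Dict.empty with hd1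
  have hkeys1 : d1.keys = keptL PySem.Set.empty cs.flatten := by
    simp only [PySem.Dict.keys, h1, List.map_map]
    simp [Function.comp_def]
  have hnodup1 : d1.keys.Nodup := by
    rw [hkeys1]
    have : keptL PySem.Set.empty cs.flatten = PySem.Set.ofList cs.flatten := by
      have := update_eq_append cs.flatten PySem.Set.empty
      simpa [PySem.Set.empty, PySem.Set.ofList, PySem.Set.update] using this.symm
    rw [this]
    exact PySem.Set.nodup_ofList cs.flatten
  have hcont1 : ∀ n ∈ cs.flatten, d1.contains n = true := by
    intro n hn
    rw [PySem.Dict.contains_iff_mem_keys, hkeys1]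
    have : keptL PySem.Set.empty cs.flatten = PySem.Set.ofList cs.flatten := by
      have := update_eq_append cs.flatten PySem.Set.empty
      simpa [PySem.Set.empty, PySem.Set.ofList, PySem.Set.update] using this.symm
    rw [this, PySem.Set.mem_ofList]
    exact hn
  -- A side, phase 2
  have h2 := items_phase2 cs 0 d1 hnodup1 hcont1
  rw [h1, List.map_map] at h2
  have h2' : ((PySem.List.enumerate cs).foldl
        (fun d p => p.2.foldl (fun d node =>
            if d.getD node none = none then d.insert node (some p.1) else d) d) d1).items
      = (keptL PySem.Set.empty cs.flatten).map (fun n => (n, firstTag 0 cs n)) := by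
    rw [h2]
    apply List.map_congr_left
    intro n hn
    simp
  rw [h2']
  -- A side, regrouping loop
  have hloop : ∀ (its : List (Int × Option Int)) (i : Int),
      its.foldl (fun l p => if p.2 = some i then l ++ [p.1] else l) []
        = (its.filter (fun p => p.2 == some i)).map Prod.fst := by
    intro its i
    have := PySem.List.foldl_append_if (fun p : Int × Option Int => p.2 == some i) Prod.fst its []
    simpa using this
  have hrange : PySem.List.pyRange 0 ((cs.length : Int))
      = PySem.List.pyRange 0 (0 + (cs.length : Int)) := by rw [zero_add]
  calc (PySem.List.pyRange 0 ((cs.length : Int))).foldl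
        (fun acc i => acc ++ [((keptL PySem.Set.empty cs.flatten).map (fun n => (n, firstTag 0 cs n))).foldl
            (fun l p => if p.2 = some i then l ++ [p.1] else l) []]) []
      = (PySem.List.pyRange 0 (0 + (cs.length : Int))).map
          (fun i => (keptL PySem.Set.empty cs.flatten).filter (fun n => firstTag 0 cs n == some i)) := by
        rw [← hrange, PySem.List.foldl_append_singleton_eq_map]
        simp only [List.nil_append]
        apply List.map_congr_left
        intro i hi
        rw [hloop]
        rw [List.filter_map, List.map_map]
        simp [Function.comp_def]
    _ = blocksL PySem.Set.empty cs := filter_blocks cs PySem.Set.empty 0
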